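-- pv_equiv track=rewrite | github.com/Koziev/AGRR-2019 | trainers/gridsearch_model2_kerascrf.py | find_label_sequences
-- ===== SOURCE A (Python) =====
-- def find_label_sequences(label_index, labels, tokens, labels_group):
--     """
--     Среди токенов tokens и их меток labels ищем все непрерывные цепочки метки с кодом label_index.
--     Возвращается строка со списком пар посимвольных позиций границ этих цепочек вида 10:15 24:32
--     """
--     ranges = []
--
--     n = min(len(labels), len(tokens))
--     i = 0
--
--     while i < n:
--         if labels[i] == label_index:
--             # Нашли начало цепочки токенов, помеченных нужной нам меткой
--             start_tok_pos = i
--             end_tok_pos = -1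
--
--             # Ищем конец цепочки
--             for j in range(i, n):
--                 if labels[j] == label_index:
--                     end_tok_pos = j
--                     i += 1
--                 else:
--                     break
--
--             # Найдена очередная цепочка токенов, длиной минимум 1 токен.
--             start_pos = tokens[start_tok_pos][1]  # начальная символьная позиция
--             if labels_group == 'V':
--                 end_pos = start_pos  # для меток V конечная позиция всегда совпадает с начальной
--             else:
--                 end_pos = tokens[end_tok_pos][2]  # конечная символьная позиция
--
--             ranges.append('{}:{}'.format(start_pos, end_pos))
--
--         i += 1
--
--     return u' '.join(ranges)
-- ===== SOURCE B (Python) =====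
-- def find_label_sequences(label_index, labels, tokens, labels_group):
--     """Single flat pass with an in_run flag instead of the outer-while/inner-for structure."""
--     def close(start_tok, end_tok):
--         start_pos = tokens[start_tok][1]
--         end_pos = start_pos if labels_group == 'V' else tokens[end_tok][2]
--         return '{}:{}'.format(start_pos, end_pos)
--
--     n = min(len(labels), len(tokens))
--     ranges = []
--     in_run = False
--     start_tok = 0
--     end_tok = 0
--     for i in range(n):
--         if labels[i] == label_index:
--             if not in_run:
--                 in_run = True
--                 start_tok = i
--             end_tok = i
--         elif in_run:
--             ranges.append(close(start_tok, end_tok))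
--             in_run = False
--     if in_run:
--         ranges.append(close(start_tok, end_tok))
--     return ' '.join(ranges)
-- ===== Notes on version B (the rewrite author's own statement) =====
-- stated objective: simpler
-- what changed: Replaced the outer-while with a nested index-advancing inner for-loop by a single flat pass over range(n) carrying an in_run flag plus start/end token positions, closing a run when a non-matching label (or the end) is reached.
import Mathlib
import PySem

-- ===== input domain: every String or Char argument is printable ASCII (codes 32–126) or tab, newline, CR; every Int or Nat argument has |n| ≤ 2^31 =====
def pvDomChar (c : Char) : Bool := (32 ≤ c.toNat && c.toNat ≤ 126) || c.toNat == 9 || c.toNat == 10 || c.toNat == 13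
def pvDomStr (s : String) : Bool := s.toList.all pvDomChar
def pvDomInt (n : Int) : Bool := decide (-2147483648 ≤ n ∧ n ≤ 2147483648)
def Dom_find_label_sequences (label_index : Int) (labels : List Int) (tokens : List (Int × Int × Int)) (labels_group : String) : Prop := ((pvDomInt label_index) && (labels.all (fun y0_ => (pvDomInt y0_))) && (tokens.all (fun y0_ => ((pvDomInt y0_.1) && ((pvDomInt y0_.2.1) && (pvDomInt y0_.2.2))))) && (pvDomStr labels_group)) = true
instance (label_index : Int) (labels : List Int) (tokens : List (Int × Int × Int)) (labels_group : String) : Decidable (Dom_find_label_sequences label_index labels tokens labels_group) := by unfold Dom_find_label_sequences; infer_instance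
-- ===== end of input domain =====

-- B replaces A's outer-while with a nested index-advancing inner for by one flat pass carrying
-- an in_run flag and start/end token positions (objective: simpler); return values are identical.

-- ===== PORT A =====
-- inner `for j in range(i, n)` of A: state (i, end_tok_pos); breaks on the first non-matching label.
def flsForA (label_index : Int) (labels : List Int) : List Int → Int → Int → Int × Int
  | [], i, e => (i, e)
  | j :: rest, i, e =>
    if PySem.List.pyGetD labels j 0 = label_index then
      flsForA label_index labels rest (i + 1) j
    else
      (i, e)

-- outer `while i < n` of A, with fuel (each iteration increases i, so n.toNat fuel suffices).
-- All list indices reached are provably in [0, n), so the pyGetD defaults are never used.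
def flsWhileA (label_index : Int) (labels : List Int) (tokens : List (Int × Int × Int))
    (labels_group : String) (n : Int) : Int → List String → Nat → List String
  | _, ranges, 0 => ranges
  | i, ranges, fuel + 1 =>
    if i < n then
      if PySem.List.pyGetD labels i 0 = label_index then
        let start_tok_pos := i
        let p := flsForA label_index labels (PySem.List.pyRange i n 1) i (-1)
        let start_pos := (PySem.List.pyGetD tokens start_tok_pos (0, 0, 0)).2.1
        let end_pos := if labels_group = "V" then start_pos
                       else (PySem.List.pyGetD tokens p.2 (0, 0, 0)).2.2
        flsWhileA label_index labels tokens labels_group n (p.1 + 1)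
          (ranges ++ [PySem.Int.toStr start_pos ++ ":" ++ PySem.Int.toStr end_pos]) fuel
      else
        flsWhileA label_index labels tokens labels_group n (i + 1) ranges fuel
    else
      ranges

def find_label_sequences (label_index : Int) (labels : List Int) (tokens : List (Int × Int × Int)) (labels_group : String) : String :=
  let n : Int := min (PySem.List.len labels) (PySem.List.len tokens)
  PySem.Str.join " " (flsWhileA label_index labels tokens labels_group n 0 [] n.toNat)

-- ===== PORT B =====
-- B's local helper close(start_tok, end_tok).
def flsCloseB (tokens : List (Int × Int × Int)) (labels_group : String) (start_tok end_tok : Int) : String :=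
  let start_pos := (PySem.List.pyGetD tokens start_tok (0, 0, 0)).2.1
  let end_pos := if labels_group = "V" then start_pos
                 else (PySem.List.pyGetD tokens end_tok (0, 0, 0)).2.2
  PySem.Int.toStr start_pos ++ ":" ++ PySem.Int.toStr end_pos

-- B's flat `for i in range(n)` loop; state (in_run, start_tok, end_tok, ranges).
def flsLoopB (label_index : Int) (labels : List Int) (tokens : List (Int × Int × Int))
    (labels_group : String) : List Int → Bool × Int × Int × List String → Bool × Int × Int × List String
  | [], st => st
  | i :: rest, (in_run, s, e, ranges) =>
    if PySem.List.pyGetD labels i 0 = label_index then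
      flsLoopB label_index labels tokens labels_group rest (true, if in_run then s else i, i, ranges)
    else if in_run then
      flsLoopB label_index labels tokens labels_group rest
        (false, s, e, ranges ++ [flsCloseB tokens labels_group s e])
    else
      flsLoopB label_index labels tokens labels_group rest (in_run, s, e, ranges)

def find_label_sequences_alt (label_index : Int) (labels : List Int) (tokens : List (Int × Int × Int)) (labels_group : String) : String :=
  let n : Int := min (PySem.List.len labels) (PySem.List.len tokens)
  let st := flsLoopB label_index labels tokens labels_group (PySem.List.pyRange 0 n 1) (false, 0, 0, [])
  let ranges := if st.1 then st.2.2.2 ++ [flsCloseB tokens labels_group st.2.1 st.2.2.1] else st.2.2.2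
  PySem.Str.join " " ranges

-- ===== PRECONDITION & SPEC =====
def Spec_find_label_sequences (label_index : Int) (labels : List Int) (tokens : List (Int × Int × Int)) (labels_group : String) (out : String) : Prop := out = find_label_sequences_alt label_index labels tokens labels_group
instance (label_index : Int) (labels : List Int) (tokens : List (Int × Int × Int)) (labels_group : String) (out : String) : Decidable (Spec_find_label_sequences label_index labels tokens labels_group out) := by unfold Spec_find_label_sequences; infer_instance

-- ===== CLAIM (what is proved, stated in full; the proofs are below) =====
def Claim_equal_find_label_sequences : Prop := ∀ (label_index : Int) (labels : List Int) (tokens : List (Int × Int × Int)) (labels_group : String), Dom_find_label_sequences label_index labels tokens labels_group → Spec_find_label_sequences label_index labels tokens labels_group (find_label_sequences label_index labels tokens labels_group)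

-- ===== LEMMAS AND PROOFS =====

-- flushing B's final state (proof-only helper).
def flsFinishB (tokens : List (Int × Int × Int)) (labels_group : String)
    (st : Bool × Int × Int × List String) : List String :=
  if st.1 then st.2.2.2 ++ [flsCloseB tokens labels_group st.2.1 st.2.2.1] else st.2.2.2

theorem flsWhileA_exit (label_index : Int) (labels : List Int) (tokens : List (Int × Int × Int))
    (labels_group : String) (n i : Int) (acc : List String) (fuel : Nat) (h : ¬ i < n) :
    flsWhileA label_index labels tokens labels_group n i acc fuel = acc := by
  cases fuel with
  | zero => rfl
  | succ f => simp [flsWhileA, h]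

-- P ∧ Q: A's while-loop from position j (not in a run / in a run with pending (s, e))
-- equals B's flat loop over pyRange j n 1 from the corresponding state, flushed.
theorem flsPQ (label_index : Int) (labels : List Int) (tokens : List (Int × Int × Int))
    (labels_group : String) (n : Int) :
    ∀ (k : Nat) (j : Int), (n - j).toNat ≤ k →
      (∀ (fuel : Nat), (n - j).toNat ≤ fuel → ∀ (acc : List String) (s e : Int),
        flsWhileA label_index labels tokens labels_group n j acc fuel
          = flsFinishB tokens labels_group
              (flsLoopB label_index labels tokens labels_group (PySem.List.pyRange j n 1) (false, s, e, acc)))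
      ∧
      (∀ (fuel : Nat), (n - j).toNat ≤ fuel → ∀ (acc : List String) (s e : Int),
        (flsWhileA label_index labels tokens labels_group n
            ((flsForA label_index labels (PySem.List.pyRange j n 1) j e).1 + 1)
            (acc ++ [flsCloseB tokens labels_group s
                      (flsForA label_index labels (PySem.List.pyRange j n 1) j e).2]) fuel)
          = flsFinishB tokens labels_group
              (flsLoopB label_index labels tokens labels_group (PySem.List.pyRange j n 1) (true, s, e, acc))) := by
  intro k
  induction k with
  | zero =>
    intro j hj
    have hjn : ¬ j < n := by omega
    have hr : PySem.List.pyRange j n 1 = [] := PySem.List.pyRange_one_eq_nil (by omega)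
    constructor
    · intro fuel _ acc s e
      rw [hr, flsWhileA_exit _ _ _ _ _ _ _ _ hjn]
      simp [flsLoopB, flsFinishB]
    · intro fuel _ acc s e
      rw [hr]
      simp only [flsForA]
      rw [flsWhileA_exit _ _ _ _ _ _ _ _ (by omega)]
      simp [flsLoopB, flsFinishB]
  | succ k ih =>
    intro j hj
    by_cases hjn : j < n
    · have hr : PySem.List.pyRange j n 1 = j :: PySem.List.pyRange (j + 1) n 1 :=
        PySem.List.pyRange_one_cons hjn
      have hk' : (n - (j + 1)).toNat ≤ k := by omega
      obtain ⟨ihP, ihQ⟩ := ih (j + 1) hk'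
      constructor
      · -- P at j
        intro fuel hfuel acc s e
        have hf1 : 1 ≤ fuel := by omega
        obtain ⟨f, rfl⟩ : ∃ f, fuel = f + 1 := ⟨fuel - 1, by omega⟩
        have hfk : (n - (j + 1)).toNat ≤ f := by omega
        rw [hr]
        by_cases hm : PySem.List.pyGetD labels j 0 = label_index
        · simp only [flsWhileA, hjn, hm, if_true, flsLoopB]
          rw [hr]
          simp only [flsForA, if_pos hm]
          have := ihQ f hfk acc j j
          simpa [flsCloseB] using this
        · simp only [flsWhileA, hjn, hm, if_false, flsLoopB]
          simpa using ihP f hfk acc s e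
      · -- Q at j
        intro fuel hfuel acc s e
        have hfk : (n - (j + 1)).toNat ≤ fuel := by omega
        rw [hr]
        by_cases hm : PySem.List.pyGetD labels j 0 = label_index
        · simp only [flsForA, flsLoopB, if_pos hm, if_true]
          exact ihQ fuel hfk acc s j
        · simp only [flsForA, flsLoopB, if_neg hm, if_true]
          have := ihP fuel hfk (acc ++ [flsCloseB tokens labels_group s e]) s e
          exact this
    · -- j ≥ n: same as the base case
      have hr : PySem.List.pyRange j n 1 = [] := PySem.List.pyRange_one_eq_nil (by omega)
      constructor
      · intro fuel _ acc s e
        rw [hr, flsWhileA_exit _ _ _ _ _ _ _ _ hjn]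
        simp [flsLoopB, flsFinishB]
      · intro fuel _ acc s e
        rw [hr]
        simp only [flsForA]
        rw [flsWhileA_exit _ _ _ _ _ _ _ _ (by omega)]
        simp [flsLoopB, flsFinishB]

-- ===== VERDICT (by name: the statement is the Claim_ definition above) =====
theorem find_label_sequences_spec : Claim_equal_find_label_sequences := by
  intro label_index labels tokens labels_group _
  have h := (flsPQ label_index labels tokens labels_group
      (min (PySem.List.len labels) (PySem.List.len tokens))
      (min (PySem.List.len labels) (PySem.List.len tokens)).toNat 0 (by omega)).1
      (min (PySem.List.len labels) (PySem.List.len tokens)).toNat (by omega) [] 0 0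
  simp only [flsFinishB] at h
  exact congrArg (PySem.Str.join " ") h
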